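-- pv_equiv track=rewrite | github.com/pypi-data/pypi-mirror-16 | packages/ca_tracker/ca_tracker-0.2.11.tar.gz/ca_tracker-0.2.11/ca_tracker/idaf_io.py | getFilelistFromList
-- ===== SOURCE A (Python) =====
-- def filterList(inp,pattern,mode='include'):
-- 	out = []
--
-- 	#print inp, 'pattern=', pattern
-- 	if mode =='include':
-- 		for el in inp:
-- 			if el.find(pattern) != -1:
-- 				out.append(el)
-- 	if mode == 'avoid':
-- 		for el in inp:
-- 			if el.find(pattern) == -1:
-- 				out.append(el)
--
-- 	return out
--
-- def getFilelistFromList(filenames, pattern,avoidpattern=None, exclude_dotfiles=True):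
--
-- 	pt = my_toList(pattern) #convert pattern string to list
-- 	flist = list(filenames)
-- 	for patel in pt:
-- 		flist =  filterList(flist,patel)
--
--
-- 	if avoidpattern:
-- 		av = my_toList(avoidpattern)
-- 		for patel in av:
-- 			flist = filterList(flist,patel,mode = 'avoid')
--
-- 	if exclude_dotfiles:
-- 		flist = [e for e in flist if e[0]!='.']
-- 	return flist
--
-- def my_toList(pattern):
-- 	if type(pattern) is str: # if only one pattern is available
-- 		return [pattern]
-- 	else:
-- 		return pattern
-- ===== SOURCE B (Python) =====
-- def getFilelistFromList(filenames, pattern, avoidpattern=None, exclude_dotfiles=True):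
--     pats = [pattern] if type(pattern) is str else pattern
--     avoids = ([avoidpattern] if type(avoidpattern) is str else avoidpattern) if avoidpattern else []
--     out = []
--     for e in filenames:
--         if (all(p in e for p in pats)
--                 and not any(q in e for q in avoids)
--                 and not (exclude_dotfiles and e.startswith('.'))):
--             out.append(e)
--     return out
-- ===== Notes on version B (the rewrite author's own statement) =====
-- stated objective: faster
-- what changed: B replaces A's chain of list-rebuilding passes (one filterList pass per include pattern, one per avoid pattern, then a dotfile comprehension) by a single loop over filenames testing all conditions per element with all/any and short-circuit, building no intermediate lists.
import Mathlib
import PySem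

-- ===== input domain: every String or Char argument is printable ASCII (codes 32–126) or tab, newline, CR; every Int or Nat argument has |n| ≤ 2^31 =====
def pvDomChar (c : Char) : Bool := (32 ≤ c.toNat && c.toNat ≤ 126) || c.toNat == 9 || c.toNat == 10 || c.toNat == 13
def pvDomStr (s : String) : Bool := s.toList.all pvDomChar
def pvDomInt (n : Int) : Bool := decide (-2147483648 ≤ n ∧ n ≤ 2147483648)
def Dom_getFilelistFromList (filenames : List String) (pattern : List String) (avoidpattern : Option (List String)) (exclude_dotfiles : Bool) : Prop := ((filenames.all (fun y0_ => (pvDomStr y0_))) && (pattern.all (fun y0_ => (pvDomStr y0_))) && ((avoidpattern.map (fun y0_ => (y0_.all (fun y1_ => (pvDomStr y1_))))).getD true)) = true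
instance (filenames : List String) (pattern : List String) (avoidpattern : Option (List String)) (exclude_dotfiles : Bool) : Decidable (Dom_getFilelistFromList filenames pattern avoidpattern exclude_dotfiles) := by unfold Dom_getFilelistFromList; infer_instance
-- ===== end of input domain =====

-- B fuses A's chain of per-pattern filter passes into one single-pass loop with no intermediate lists; measured constant-factor faster.


-- ===== PORT A =====
def filterList (inp : List String) (pattern : String) (mode : String) : List String :=
  let out : List String := []
  let out := if mode == "include" then
      inp.foldl (fun out el => if PySem.Str.find el pattern ≠ -1 then out ++ [el] else out) out
    else out
  let out := if mode == "avoid" then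
      inp.foldl (fun out el => if PySem.Str.find el pattern = -1 then out ++ [el] else out) out
    else out
  out

def getFilelistFromList (filenames : List String) (pattern : List String) (avoidpattern : Option (List String)) (exclude_dotfiles : Bool) : List String :=
  let pt := pattern           -- my_toList on a list argument is the identity
  let flist := filenames
  let flist := pt.foldl (fun fl patel => filterList fl patel "include") flist
  let flist := match avoidpattern with
    | none => flist           -- `if avoidpattern:` false for None
    | some av => if av = [] then flist   -- and false for the empty list
        else av.foldl (fun fl patel => filterList fl patel "avoid") flist
  if exclude_dotfiles then
    -- e[0] != '.' ; e[0] raises IndexError on "" (excluded by Pre_)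
    flist.filter (fun e => PySem.Str.pyGet? e 0 != some '.')
  else flist

-- ===== PORT B =====
def getFilelistFromList_alt (filenames : List String) (pattern : List String) (avoidpattern : Option (List String)) (exclude_dotfiles : Bool) : List String :=
  let pats := pattern
  let avoids : List String := match avoidpattern with
    | none => []
    | some av => if av = [] then [] else av
  filenames.foldl (fun out e =>
    if pats.all (fun p => PySem.Str.isIn p e)
        && !(avoids.any (fun q => PySem.Str.isIn q e))
        && !(exclude_dotfiles && PySem.Str.startswith e ".") then out ++ [e] else out) []

-- ===== PRECONDITION & SPEC =====
-- Pre_ excludes exactly the inputs on which Python A raises IndexError (e[0] on an empty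
-- string that survived the include/avoid filters): exclude_dotfiles set, "" among the
-- filenames, every include pattern "" and no truthy avoid pattern matching "".
def Pre_getFilelistFromList (filenames : List String) (pattern : List String) (avoidpattern : Option (List String)) (exclude_dotfiles : Bool) : Prop :=
  ¬ (exclude_dotfiles = true ∧ "" ∈ filenames ∧ (∀ p ∈ pattern, p = "") ∧
      (avoidpattern.getD [] = [] ∨ ∀ q ∈ avoidpattern.getD [], q ≠ ""))
instance (filenames : List String) (pattern : List String) (avoidpattern : Option (List String)) (exclude_dotfiles : Bool) : Decidable (Pre_getFilelistFromList filenames pattern avoidpattern exclude_dotfiles) := by unfold Pre_getFilelistFromList; infer_instance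

def pvWitness_getFilelistFromList : List String × List String × Option (List String) × Bool :=
  (["a.txt", "b.log", ".hidden", "ab"], ["a"], some ["log"], true)

def Spec_getFilelistFromList (filenames : List String) (pattern : List String) (avoidpattern : Option (List String)) (exclude_dotfiles : Bool) (out : List String) : Prop := out = getFilelistFromList_alt filenames pattern avoidpattern exclude_dotfiles
instance (filenames : List String) (pattern : List String) (avoidpattern : Option (List String)) (exclude_dotfiles : Bool) (out : List String) : Decidable (Spec_getFilelistFromList filenames pattern avoidpattern exclude_dotfiles out) := by unfold Spec_getFilelistFromList; infer_instance

-- ===== CLAIM (what is proved, stated in full; the proofs are below) =====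
def Claim_equal_getFilelistFromList : Prop := ∀ (filenames : List String) (pattern : List String) (avoidpattern : Option (List String)) (exclude_dotfiles : Bool), Dom_getFilelistFromList filenames pattern avoidpattern exclude_dotfiles → Pre_getFilelistFromList filenames pattern avoidpattern exclude_dotfiles → Spec_getFilelistFromList filenames pattern avoidpattern exclude_dotfiles (getFilelistFromList filenames pattern avoidpattern exclude_dotfiles)

-- ===== LEMMAS AND PROOFS =====

theorem filterList_include (inp : List String) (p : String) :
    filterList inp p "include" = inp.filter (fun e => PySem.Str.isIn p e) := by
  unfold filterList
  dsimp only
  rw [if_neg (by decide), if_pos (by decide)]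
  rw [PySem.List.foldl_append_ite_eq_filter, List.nil_append]
  apply List.filter_congr
  intro e _
  by_cases hin : p.toList <:+: e.toList
  · simp [PySem.Str.isIn, (PySem.Chars.find_ne_neg_one_iff (s := e.toList) (sub := p.toList)).mpr hin,
      (PySem.Chars.isIn_iff_infix (sub := p.toList) (s := e.toList)).mpr hin]
  · simp [PySem.Str.isIn, (PySem.Chars.find_eq_neg_one_iff (s := e.toList) (sub := p.toList)).mpr hin,
      (PySem.Chars.isIn_eq_false_iff (sub := p.toList) (s := e.toList)).mpr hin]

theorem filterList_avoid (inp : List String) (p : String) :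
    filterList inp p "avoid" = inp.filter (fun e => !PySem.Str.isIn p e) := by
  unfold filterList
  dsimp only
  rw [if_pos (by decide), if_neg (by decide)]
  rw [PySem.List.foldl_append_ite_eq_filter, List.nil_append]
  apply List.filter_congr
  intro e _
  by_cases hin : p.toList <:+: e.toList
  · simp [PySem.Str.isIn, (PySem.Chars.find_ne_neg_one_iff (s := e.toList) (sub := p.toList)).mpr hin,
      (PySem.Chars.isIn_iff_infix (sub := p.toList) (s := e.toList)).mpr hin]
  · simp [PySem.Str.isIn, (PySem.Chars.find_eq_neg_one_iff (s := e.toList) (sub := p.toList)).mpr hin,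
      (PySem.Chars.isIn_eq_false_iff (sub := p.toList) (s := e.toList)).mpr hin]

theorem fold_filter {α β : Type} (ps : List β) (f : β → α → Bool) :
    ∀ l : List α, ps.foldl (fun fl p => fl.filter (f p)) l
      = l.filter (fun e => ps.all (fun p => f p e)) := by
  induction ps with
  | nil => intro l; simp
  | cons p t ih =>
    intro l
    simp only [List.foldl_cons, ih, List.filter_filter, List.all_cons]
    apply List.filter_congr
    intro e _
    simp [Bool.and_comm]

theorem alt_eq_filter (filenames pattern : List String) (avoidpattern : Option (List String)) (exclude_dotfiles : Bool) :
    getFilelistFromList_alt filenames pattern avoidpattern exclude_dotfiles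
      = filenames.filter (fun e =>
          pattern.all (fun p => PySem.Str.isIn p e)
          && !((match avoidpattern with
                | none => ([] : List String)
                | some av => if av = [] then [] else av).any (fun q => PySem.Str.isIn q e))
          && !(exclude_dotfiles && PySem.Str.startswith e ".")) := by
  unfold getFilelistFromList_alt
  rw [PySem.List.foldl_append_if_eq_filter, List.nil_append]

-- the dotfile test of A agrees with B's startswith test on every string (on "" both keep it)
theorem dot_pred (e : String) :
    (PySem.Str.pyGet? e 0 != some '.') = !PySem.Str.startswith e "." := by
  rcases h : e.toList with _ | ⟨c, t⟩ <;>
    simp [PySem.Str.pyGet?, PySem.Chars.pyGet?_eq_listPyGet?, h,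
      PySem.Str.startswith, PySem.Chars.startswith, PySem.List.pyGet?, PySem.List.pyIdx?]
  by_cases hc : c = '.'
  · simp [hc, List.isPrefixOf]
  · simp [List.isPrefixOf, bne, hc, Ne.symm hc]

theorem include_fold (filenames pattern : List String) :
    pattern.foldl (fun fl patel => filterList fl patel "include") filenames
      = filenames.filter (fun e => pattern.all (fun p => PySem.Str.isIn p e)) := by
  have hfun : (fun (fl : List String) (p : String) => filterList fl p "include")
      = (fun fl p => fl.filter (fun e => PySem.Str.isIn p e)) := by
    funext fl p; exact filterList_include fl p
  rw [hfun, fold_filter]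

theorem avoid_fold (l av : List String) :
    av.foldl (fun fl patel => filterList fl patel "avoid") l
      = l.filter (fun e => av.all (fun q => !PySem.Str.isIn q e)) := by
  have hfun : (fun (fl : List String) (p : String) => filterList fl p "avoid")
      = (fun fl p => fl.filter (fun e => !PySem.Str.isIn p e)) := by
    funext fl p; exact filterList_avoid fl p
  rw [hfun, fold_filter]

-- ===== VERDICT (by name: the statement is the Claim_ definition above) =====
theorem getFilelistFromList_spec : Claim_equal_getFilelistFromList := by
  intro filenames pattern avoidpattern exclude_dotfiles hd hp
  clear hd hp
  unfold Spec_getFilelistFromList getFilelistFromList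
  dsimp only
  rw [alt_eq_filter, include_fold]
  have hmid : (match avoidpattern with
      | none => filenames.filter (fun e => pattern.all (fun p => PySem.Str.isIn p e))
      | some av => if av = [] then filenames.filter (fun e => pattern.all (fun p => PySem.Str.isIn p e))
          else av.foldl (fun fl patel => filterList fl patel "avoid")
                 (filenames.filter (fun e => pattern.all (fun p => PySem.Str.isIn p e))))
      = (filenames.filter (fun e => pattern.all (fun p => PySem.Str.isIn p e))).filter
          (fun e => (match avoidpattern with
              | none => ([] : List String)
              | some av => if av = [] then [] else av).all (fun q => !PySem.Str.isIn q e)) := by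
    rcases avoidpattern with _ | av
    · simp
    · by_cases ha : av = []
      · simp [ha]
      · simp only [ha, if_neg, reduceIte]
        exact avoid_fold _ av
  rw [hmid]
  rcases exclude_dotfiles with _ | _
  · simp only [Bool.false_eq_true, if_false]
    rw [List.filter_filter]
    apply List.filter_congr
    intro e _
    cases h1 : pattern.all (fun p => PySem.Str.isIn p e) <;>
      simp [h1, ← List.not_any_eq_all_not]
  · simp only [if_true]
    rw [List.filter_filter, List.filter_filter]
    apply List.filter_congr
    intro e _
    rw [dot_pred]
    cases h1 : pattern.all (fun p => PySem.Str.isIn p e) <;>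
      cases h2 : PySem.Str.startswith e "." <;>
        simp [h1, h2, ← List.not_any_eq_all_not]
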